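-- pv_equiv track=rewrite | github.com/lorcanpd/readformer | get_artefact_reads.py | is_in_low_complexity_region
-- ===== SOURCE A (Python) =====
-- def is_in_low_complexity_region(chrom, pos, low_complexity_regions):
--     """
--     Check if a position is in a low-complexity region.
--
--     :param chrom:
--         chromosome name.
--     :param pos:
--         position.
--     :param low_complexity_regions:
--         dictionary of low-complexity regions.
--     :return:
--         True if the position is in a low-complexity region, False otherwise.
--     """
--     if low_complexity_regions is None:
--         return False
--     regions = low_complexity_regions.get(chrom, [])
--     for start, end in regions:
--         if start <= pos < end:
--             return True
--     return False
-- ===== SOURCE B (Python) =====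
-- def is_in_low_complexity_region(chrom, pos, low_complexity_regions):
--     """Same result via a max over covering interval ends instead of a short-circuit scan."""
--     if low_complexity_regions is None:
--         return False
--     ends = [end for start, end in low_complexity_regions.get(chrom, []) if start <= pos]
--     return max(ends, default=pos) > pos
-- ===== Notes on version B (the rewrite author's own statement) =====
-- stated objective: alternative
-- what changed: Replaces the early-return membership scan with a filter of intervals whose start covers pos followed by a max over their ends compared to pos (pos is inside some interval iff the largest covering end exceeds pos); the reviewer's bisect idea is not exact because A never assumes the intervals are sorted or disjoint.
import Mathlib
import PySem

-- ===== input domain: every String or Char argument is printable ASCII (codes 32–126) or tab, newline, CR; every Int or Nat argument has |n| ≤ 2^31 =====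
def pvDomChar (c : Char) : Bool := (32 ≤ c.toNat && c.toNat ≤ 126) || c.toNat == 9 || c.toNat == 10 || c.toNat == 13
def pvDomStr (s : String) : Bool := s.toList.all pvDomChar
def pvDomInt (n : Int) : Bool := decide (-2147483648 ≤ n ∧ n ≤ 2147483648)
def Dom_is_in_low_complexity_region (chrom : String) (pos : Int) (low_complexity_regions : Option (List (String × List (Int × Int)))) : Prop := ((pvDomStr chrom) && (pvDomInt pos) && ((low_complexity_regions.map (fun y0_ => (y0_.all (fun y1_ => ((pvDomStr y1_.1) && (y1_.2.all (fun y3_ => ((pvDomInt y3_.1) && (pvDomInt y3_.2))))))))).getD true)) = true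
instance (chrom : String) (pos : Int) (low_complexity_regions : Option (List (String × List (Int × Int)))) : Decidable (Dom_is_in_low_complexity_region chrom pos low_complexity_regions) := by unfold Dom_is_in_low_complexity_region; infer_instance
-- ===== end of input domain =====

-- ===== PORT A =====
-- Header: B replaces A's early-return scan by a max over the ends of intervals whose start
-- covers pos (alternative decomposition, same O(n) cost).
def pvLoopA (pos : Int) : List (Int × Int) → Bool
  | [] => false
  | (s, e) :: t => if s ≤ pos ∧ pos < e then true else pvLoopA pos t

def is_in_low_complexity_region (chrom : String) (pos : Int) (low_complexity_regions : Option (List (String × List (Int × Int)))) : Bool :=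
  match low_complexity_regions with
  | none => false
  | some d => pvLoopA pos ((PySem.Dict.mk d).getD chrom [])

-- ===== PORT B =====
def is_in_low_complexity_region_alt (chrom : String) (pos : Int) (low_complexity_regions : Option (List (String × List (Int × Int)))) : Bool :=
  match low_complexity_regions with
  | none => false
  | some d =>
    let ends := (((PySem.Dict.mk d).getD chrom []).filter (fun p => decide (p.1 ≤ pos))).map (·.2)
    decide (pos < PySem.List.maxD ends (fun x => x) pos)

-- ===== PRECONDITION & SPEC =====
def Spec_is_in_low_complexity_region (chrom : String) (pos : Int) (low_complexity_regions : Option (List (String × List (Int × Int)))) (out : Bool) : Prop := out = is_in_low_complexity_region_alt chrom pos low_complexity_regions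
instance (chrom : String) (pos : Int) (low_complexity_regions : Option (List (String × List (Int × Int)))) (out : Bool) : Decidable (Spec_is_in_low_complexity_region chrom pos low_complexity_regions out) := by unfold Spec_is_in_low_complexity_region; infer_instance

-- ===== CLAIM (what is proved, stated in full; the proofs are below) =====
def Claim_equal_is_in_low_complexity_region : Prop := ∀ (chrom : String) (pos : Int) (low_complexity_regions : Option (List (String × List (Int × Int)))), Dom_is_in_low_complexity_region chrom pos low_complexity_regions → Spec_is_in_low_complexity_region chrom pos low_complexity_regions (is_in_low_complexity_region chrom pos low_complexity_regions)

-- ===== LEMMAS AND PROOFS =====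
-- A's scan returns true iff some interval covers pos.
theorem pvLoopA_eq_true_iff (pos : Int) (rs : List (Int × Int)) :
    pvLoopA pos rs = true ↔ ∃ p ∈ rs, p.1 ≤ pos ∧ pos < p.2 := by
  induction rs with
  | nil => simp [pvLoopA]
  | cons h t ih =>
    obtain ⟨s, e⟩ := h
    by_cases hc : s ≤ pos ∧ pos < e
    · simp [pvLoopA, hc]
    · simp only [pvLoopA, if_neg hc, ih, List.mem_cons]
      constructor
      · rintro ⟨p, hp, h1, h2⟩; exact ⟨p, Or.inr hp, h1, h2⟩
      · rintro ⟨p, hp | hp, h1, h2⟩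
        · cases hp; exact absurd ⟨h1, h2⟩ hc
        · exact ⟨p, hp, h1, h2⟩

-- B's max-of-covering-ends test holds iff some covering interval ends after pos.
theorem pvMaxD_iff (pos : Int) (rs : List (Int × Int)) :
    (pos < PySem.List.maxD ((rs.filter (fun p => decide (p.1 ≤ pos))).map (·.2)) (fun x => x) pos)
      ↔ ∃ p ∈ rs, p.1 ≤ pos ∧ pos < p.2 := by
  set ends := (rs.filter (fun p => decide (p.1 ≤ pos))).map (·.2) with hends
  have hmem : ∀ e, e ∈ ends ↔ ∃ p ∈ rs, p.1 ≤ pos ∧ p.2 = e := by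
    intro e; simp [hends, List.mem_map, List.mem_filter, and_assoc]
  constructor
  · intro hlt
    cases hE : ends with
    | nil => rw [hE] at hlt; simp [PySem.List.maxD, PySem.List.max?] at hlt
    | cons a t =>
      have hm : PySem.List.maxD ends (fun x => x) pos ∈ ends := by
        rw [hE]
        have := PySem.List.max?_id_cons (x := a) (t := t)
        simp [PySem.List.maxD, this]
        rcases PySem.List.foldl_max_mem t a with h | h
        · exact Or.inl h
        · exact Or.inr h
      rcases (hmem _).1 hm with ⟨p, hp, h1, h2⟩
      exact ⟨p, hp, h1, by rw [h2]; exact hlt⟩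
  · rintro ⟨p, hp, h1, h2⟩
    have he : p.2 ∈ ends := (hmem p.2).2 ⟨p, hp, h1, rfl⟩
    cases hE : ends with
    | nil => rw [hE] at he; cases he
    | cons a t =>
      rw [hE] at he
      have hle : p.2 ≤ PySem.List.maxD (a :: t) (fun x => x) pos := by
        have := PySem.List.max?_id_cons (x := a) (t := t)
        simp only [PySem.List.maxD, this, Option.getD_some]
        rcases List.mem_cons.1 he with h | h
        · subst h; exact (PySem.List.le_foldl_max t p.2).1
        · exact (PySem.List.le_foldl_max t a).2 _ h
      omega

-- ===== VERDICT (by name: the statement is the Claim_ definition above) =====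
theorem is_in_low_complexity_region_spec : Claim_equal_is_in_low_complexity_region := by
  intro chrom pos lcr _
  unfold Spec_is_in_low_complexity_region is_in_low_complexity_region is_in_low_complexity_region_alt
  cases lcr with
  | none => rfl
  | some d =>
    simp only []
    rw [Bool.eq_iff_iff, pvLoopA_eq_true_iff, decide_eq_true_iff, pvMaxD_iff]
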